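-- pv_equiv track=rewrite | github.com/pizzert/UTXO_analysis | analysis/utils.py | parse_b128
-- ===== SOURCE A (Python) =====
-- def parse_b128(utxo, offset=0):
--     """ Parses a given serialized UTXO to extract a base-128 varint.
--
--     :param utxo: Serialized UTXO from which the varint will be parsed.
--     :type utxo: hex str
--     :param offset: Offset where the beginning of the varint if located in the UTXO.
--     :type offset: int
--     :return: The extracted varint, and the offset of the byte located right after it.
--     :rtype: hex str, int
--     """
--
--     data = utxo[offset:offset+2]
--     offset += 2
--     more_bytes = int(data, 16) & 0x80  # MSB b128 Varints have set the bit 128 for every byte but the last one,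
--     # indicating that there is an additional byte following the one being analyzed. If bit 128 of the byte being read is
--     # not set, we are analyzing the last byte, otherwise, we should continue reading.
--     while more_bytes:
--         data += utxo[offset:offset+2]
--         more_bytes = int(utxo[offset:offset+2], 16) & 0x80
--         offset += 2
--
--     return data, offset
-- ===== SOURCE B (Python) =====
-- def parse_b128(utxo, offset=0):
--     # Find the end of the varint first, then take one slice.
--     i = offset
--     while int(utxo[i:i+2], 16) & 0x80:
--         i += 2
--     i += 2
--     return utxo[offset:i], i
-- ===== Notes on version B (the rewrite author's own statement) =====
-- stated objective: simpler
-- what changed: B finds the varint's end position with a boundary scan and takes one slice of the original string, instead of A's incremental per-byte string concatenation.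
import Mathlib
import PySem

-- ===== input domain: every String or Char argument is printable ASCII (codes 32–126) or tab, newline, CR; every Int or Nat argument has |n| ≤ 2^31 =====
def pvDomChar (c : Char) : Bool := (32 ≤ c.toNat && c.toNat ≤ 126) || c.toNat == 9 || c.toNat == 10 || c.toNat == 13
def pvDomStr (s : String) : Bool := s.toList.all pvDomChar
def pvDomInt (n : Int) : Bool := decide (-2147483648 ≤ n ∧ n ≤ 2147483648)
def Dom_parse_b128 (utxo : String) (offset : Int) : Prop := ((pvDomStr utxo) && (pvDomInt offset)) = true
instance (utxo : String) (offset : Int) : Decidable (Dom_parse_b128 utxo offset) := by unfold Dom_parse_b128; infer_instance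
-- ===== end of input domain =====

-- B replaces A's incremental per-byte string concatenation by a boundary-finding scan
-- followed by a single slice (objective: simpler). Both raise/return identically.

-- ===== PORT A =====
-- the while loop of A: state is (data, offset, more_bytes); fuel only makes it total
-- (Python raises ValueError where ofCharsBase? is none: those inputs are outside Pre_).
def parseA_loop : Nat → List Char → List Char → Int → Int → List Char × Int
  | 0, _, data, off, _ => (data, off)
  | f+1, cs, data, off, more =>
    if more ≠ 0 then
      match PySem.Int.ofCharsBase? (PySem.List.slice cs (some off) (some (off+2))) 16 with
      | none => (data ++ PySem.List.slice cs (some off) (some (off+2)), off + 2)  -- ValueError in Python (outside Pre_)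
      | some v => parseA_loop f cs (data ++ PySem.List.slice cs (some off) (some (off+2))) (off+2) (PySem.Int.band v 128)
    else (data, off)

def parse_b128 (utxo : String) (offset : Int) : String × Int :=
  let cs := utxo.toList
  let data := PySem.List.slice cs (some offset) (some (offset+2))
  match PySem.Int.ofCharsBase? data 16 with
  | none => (String.ofList data, offset + 2)  -- ValueError in Python (outside Pre_)
  | some v =>
    let r := parseA_loop (cs.length + 1) cs data (offset + 2) (PySem.Int.band v 128)
    (String.ofList r.1, r.2)

-- ===== PORT B =====
-- B's while loop: advance i past every continuation byte; returns the position of the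
-- final (non-continuation) byte.  Fuel only makes it total.
def parseB_find : Nat → List Char → Int → Int
  | 0, _, i => i
  | f+1, cs, i =>
    match PySem.Int.ofCharsBase? (PySem.List.slice cs (some i) (some (i+2))) 16 with
    | none => i  -- ValueError in Python (outside Pre_)
    | some v => if PySem.Int.band v 128 ≠ 0 then parseB_find f cs (i+2) else i

def parse_b128_alt (utxo : String) (offset : Int) : String × Int :=
  let cs := utxo.toList
  let e := parseB_find (cs.length + 1) cs offset + 2
  (String.ofList (PySem.List.slice cs (some offset) (some e)), e)

-- ===== PRECONDITION & SPEC =====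
-- byte classifiers for Pre_: the 2-hex-char group starting at position i parses via int(.,16)
-- as a continuation byte (bit 128 set) / as a final byte (bit 128 clear)
def pvMore (cs : List Char) (i : Int) : Bool :=
  match PySem.Int.ofCharsBase? (PySem.List.slice cs (some i) (some (i+2))) 16 with
  | none => false
  | some v => PySem.Int.band v 128 != 0

def pvDone (cs : List Char) (i : Int) : Bool :=
  match PySem.Int.ofCharsBase? (PySem.List.slice cs (some i) (some (i+2))) 16 with
  | none => false
  | some v => PySem.Int.band v 128 == 0

-- Exactly the inputs on which Python A returns: some k (at most one byte per string
-- character, so k ≤ |utxo|) such that the first k groups are parseable continuation bytes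
-- and group k is a parseable final byte; everywhere else the int() call hits an
-- unparseable/empty slice and raises ValueError.
def Pre_parse_b128 (utxo : String) (offset : Int) : Prop :=
  ∃ k ≤ utxo.toList.length,
    (∀ j < k, pvMore utxo.toList (offset + 2*(j:Int)) = true) ∧
    pvDone utxo.toList (offset + 2*(k:Int)) = true
instance (utxo : String) (offset : Int) : Decidable (Pre_parse_b128 utxo offset) := by
  unfold Pre_parse_b128; infer_instance

def pvWitness_parse_b128 : String × Int := ("0a", 0)

def Spec_parse_b128 (utxo : String) (offset : Int) (out : String × Int) : Prop := out = parse_b128_alt utxo offset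
instance (utxo : String) (offset : Int) (out : String × Int) : Decidable (Spec_parse_b128 utxo offset out) := by unfold Spec_parse_b128; infer_instance

-- ===== CLAIM (what is proved, stated in full; the proofs are below) =====
def Claim_equal_parse_b128 : Prop := ∀ (utxo : String) (offset : Int), Dom_parse_b128 utxo offset → Pre_parse_b128 utxo offset → Spec_parse_b128 utxo offset (parse_b128 utxo offset)

-- ===== LEMMAS AND PROOFS =====

-- the value of A's `more_bytes` flag for the byte starting at position i (0 when int() raises)
def moreAt (cs : List Char) (i : Int) : Int :=
  match PySem.Int.ofCharsBase? (PySem.List.slice cs (some i) (some (i+2))) 16 with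
  | none => 0
  | some v => PySem.Int.band v 128

-- the varint scan starting at position i terminates after exactly k continuation bytes
def TermScan (cs : List Char) (i : Int) (k : Nat) : Prop :=
  (∀ j < k, pvMore cs (i + 2*(j:Int)) = true) ∧ pvDone cs (i + 2*(k:Int)) = true

lemma parse_nil : PySem.Int.ofCharsBase? ([] : List Char) 16 = none := by decide

lemma slice_self (cs : List Char) (a : Int) :
    PySem.List.slice cs (some a) (some a) = [] := by
  simp [PySem.List.slice]

lemma parse_nonempty {cs : List Char} {i v : Int}
    (h : PySem.Int.ofCharsBase? (PySem.List.slice cs (some i) (some (i+2))) 16 = some v) :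
    PySem.List.slice cs (some i) (some (i+2)) ≠ [] := by
  intro he; rw [he, parse_nil] at h; cases h

lemma clamp_lt_of_nonempty {cs : List Char} {a b : Int}
    (h : PySem.List.slice cs (some a) (some b) ≠ []) :
    PySem.List.clampIdx cs.length a < PySem.List.clampIdx cs.length b := by
  have hl := PySem.List.length_slice cs a b
  rcases Nat.lt_or_ge (PySem.List.clampIdx cs.length a) (PySem.List.clampIdx cs.length b) with h' | h'
  · exact h'
  · exfalso
    apply h
    have : (PySem.List.slice cs (some a) (some b)).length = 0 := by omega
    exact List.eq_nil_of_length_eq_zero this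

lemma slice_adj (cs : List Char) (a b c : Int)
    (hab : PySem.List.clampIdx cs.length a ≤ PySem.List.clampIdx cs.length b)
    (hbc : PySem.List.clampIdx cs.length b ≤ PySem.List.clampIdx cs.length c) :
    PySem.List.slice cs (some a) (some b) ++ PySem.List.slice cs (some b) (some c) =
      PySem.List.slice cs (some a) (some c) := by
  simp only [PySem.List.slice]
  set A := PySem.List.clampIdx cs.length a
  set B := PySem.List.clampIdx cs.length b
  set C := PySem.List.clampIdx cs.length c
  have hdd : (cs.drop A).drop (B - A) = cs.drop B := by
    rw [List.drop_drop]; congr 1; omega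
  have : C - A = (B - A) + (C - B) := by omega
  rw [this, List.take_add, hdd]

lemma pvMore_parse {cs : List Char} {i : Int} (h : pvMore cs i = true) :
    ∃ v, PySem.Int.ofCharsBase? (PySem.List.slice cs (some i) (some (i+2))) 16 = some v ∧
      PySem.Int.band v 128 ≠ 0 := by
  unfold pvMore at h
  split at h
  · cases h
  · next v hv => exact ⟨v, hv, by simpa using h⟩

lemma pvDone_parse {cs : List Char} {i : Int} (h : pvDone cs i = true) :
    ∃ v, PySem.Int.ofCharsBase? (PySem.List.slice cs (some i) (some (i+2))) 16 = some v ∧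
      PySem.Int.band v 128 = 0 := by
  unfold pvDone at h
  split at h
  · cases h
  · next v hv => exact ⟨v, hv, by simpa using h⟩

lemma term_shift {cs : List Char} {i : Int} {k : Nat} (h : TermScan cs i (k+1)) :
    pvMore cs i = true ∧ TermScan cs (i+2) k := by
  obtain ⟨hm, hd⟩ := h
  refine ⟨by simpa using hm 0 (Nat.succ_pos k), ?_, ?_⟩
  · intro j hj
    have := hm (j+1) (by omega)
    have he : i + 2*((j:Int)+1) = i + 2 + 2*(j:Int) := by ring
    rw [show ((j+1 : Nat) : Int) = (j:Int)+1 by push_cast; ring, he] at this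
    exact this
  · have he : i + 2*(((k+1):Nat) : Int) = i + 2 + 2*(k:Int) := by push_cast; ring
    rw [he] at hd
    exact hd

lemma scan_parse {cs : List Char} {i : Int} {k : Nat} (h : TermScan cs i k) :
    ∃ v, PySem.Int.ofCharsBase? (PySem.List.slice cs (some i) (some (i+2))) 16 = some v := by
  cases k with
  | zero =>
    obtain ⟨v, hv, -⟩ := pvDone_parse (by simpa using h.2)
    exact ⟨v, hv⟩
  | succ k =>
    obtain ⟨v, hv, -⟩ := pvMore_parse (term_shift h).1
    exact ⟨v, hv⟩

-- along a terminating scan the clamped end position only moves right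
lemma term_clamp (k : Nat) : ∀ (cs : List Char) (i : Int), TermScan cs i k →
    PySem.List.clampIdx cs.length (i+2) ≤ PySem.List.clampIdx cs.length (i + 2*(k:Int) + 2) := by
  induction k with
  | zero => intro cs i _; simp
  | succ k ih =>
    intro cs i h
    obtain ⟨hm, ht⟩ := term_shift h
    obtain ⟨v, hv⟩ := scan_parse ht
    have h1 : PySem.List.clampIdx cs.length (i+2) < PySem.List.clampIdx cs.length (i+2+2) :=
      clamp_lt_of_nonempty (parse_nonempty hv)
    have h2 := ih cs (i+2) ht
    have he : i + 2 + 2*(k:Int) + 2 = i + 2*(((k+1):Nat):Int) + 2 := by push_cast; ring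
    rw [he] at h2
    omega

lemma find_val (k : Nat) : ∀ (f : Nat) (cs : List Char) (i : Int), k < f → TermScan cs i k →
    parseB_find f cs i = i + 2*(k:Int) := by
  induction k with
  | zero =>
    intro f cs i hf h
    obtain ⟨v, hv, hb⟩ := pvDone_parse (by simpa using h.2)
    cases f with
    | zero => omega
    | succ f => simp [parseB_find, hv, hb]
  | succ k ih =>
    intro f cs i hf h
    obtain ⟨hm, ht⟩ := term_shift h
    obtain ⟨v, hv, hb⟩ := pvMore_parse hm
    cases f with
    | zero => omega
    | succ f =>
      simp only [parseB_find, hv]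
      rw [if_pos hb, ih f cs (i+2) (by omega) ht]
      push_cast; ring

-- Main invariant: A's loop, entered after the byte at position i produced flag `moreAt cs i`,
-- appends exactly the slice from i+2 up to the varint's end, and returns the end offset.
lemma loopA_eq (k : Nat) : ∀ (f : Nat) (cs : List Char) (i : Int) (data : List Char),
    k < f → TermScan cs i k →
    parseA_loop f cs data (i+2) (moreAt cs i) =
      (data ++ PySem.List.slice cs (some (i+2)) (some (i + 2*(k:Int) + 2)), i + 2*(k:Int) + 2) := by
  induction k with
  | zero =>
    intro f cs i data hf h
    obtain ⟨v, hv, hb⟩ := pvDone_parse (by simpa using h.2)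
    have hm : moreAt cs i = 0 := by unfold moreAt; rw [hv]; exact hb
    cases f with
    | zero => omega
    | succ f =>
      rw [hm]
      simp [parseA_loop, slice_self]
  | succ k ih =>
    intro f cs i data hf h
    obtain ⟨hmore, ht⟩ := term_shift h
    obtain ⟨v, hv, hb⟩ := pvMore_parse hmore
    have hm : moreAt cs i ≠ 0 := by unfold moreAt; rw [hv]; exact hb
    cases f with
    | zero => omega
    | succ f =>
      obtain ⟨w, hw⟩ := scan_parse ht
      rw [show i+2+2 = (i+2)+2 by ring] at hw
      simp only [parseA_loop, if_pos hm, hw]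
      have hmore2 : PySem.Int.band w 128 = moreAt cs (i+2) := by
        unfold moreAt; rw [hw]
      rw [show (i+2)+2 = i+2+2 by ring, hmore2,
          ih f cs (i+2) (data ++ PySem.List.slice cs (some (i+2)) (some (i+2+2))) (by omega) ht]
      have h1 : PySem.List.clampIdx cs.length (i+2) ≤ PySem.List.clampIdx cs.length (i+2+2) :=
        le_of_lt (clamp_lt_of_nonempty (parse_nonempty (by rw [show i+2+2 = (i+2)+2 by ring] at hw; exact hw)))
      have h2 := term_clamp k cs (i+2) ht
      have he1 : i + 2 + 2*(k:Int) + 2 = i + 2*(((k+1):Nat):Int) + 2 := by push_cast; ring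
      rw [he1] at h2 ⊢
      rw [List.append_assoc, slice_adj cs (i+2) (i+2+2) (i + 2*(((k+1):Nat):Int) + 2) h1 h2]

-- ===== VERDICT (by name: the statement is the Claim_ definition above) =====
theorem parse_b128_spec : Claim_equal_parse_b128 := by
  intro utxo offset _hdom hpre
  obtain ⟨k, hk, hterm⟩ : ∃ k ≤ utxo.toList.length, TermScan utxo.toList offset k := by
    obtain ⟨k, hk, h1, h2⟩ := hpre; exact ⟨k, hk, h1, h2⟩
  unfold Spec_parse_b128 parse_b128 parse_b128_alt
  set cs := utxo.toList with hcs
  obtain ⟨v, hv⟩ := scan_parse hterm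
  simp only [hv]
  have hmore : PySem.Int.band v 128 = moreAt cs offset := by
    unfold moreAt; rw [hv]
  rw [hmore, loopA_eq k (cs.length + 1) cs offset _ (by omega) hterm,
      find_val k (cs.length + 1) cs offset (by omega) hterm]
  have h1 : PySem.List.clampIdx cs.length offset ≤ PySem.List.clampIdx cs.length (offset+2) :=
    le_of_lt (clamp_lt_of_nonempty (parse_nonempty hv))
  have h2 := term_clamp k cs offset hterm
  rw [show offset + 2*(k:Int) + 2 = offset + 2 + 2*(k:Int) by ring] at *
  rw [slice_adj cs offset (offset+2) (offset + 2 + 2*(k:Int)) h1 h2]
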